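-- pv_equiv track=rewrite | github.com/cocojumbo17/python | hashtable.py | get_hash
-- ===== SOURCE A (Python) =====
-- def get_hash(key):
--     hashsum = 0
--     if isinstance(key, (list, str)):
--         for character in key:
--             hashsum = ord(character) + (hashsum << 5) - hashsum
--     else:
--         hashsum = key
--
--     return hashsum
-- ===== SOURCE B (Python) =====
-- def get_hash(key):
--     if isinstance(key, (list, str)):
--         total = 0
--         power = 1
--         for character in reversed(key):
--             total += ord(character) * power
--             power *= 31
--         return total
--     return key
-- ===== Notes on version B (the rewrite author's own statement) =====
-- stated objective: alternative
-- what changed: Replaces Horner's in-order accumulation (hashsum = ord(c) + (hashsum<<5) - hashsum) with an explicit weighted polynomial sum: iterate the characters in reverse while threading a running power of 31 and add ord(c)*power.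
import Mathlib
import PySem

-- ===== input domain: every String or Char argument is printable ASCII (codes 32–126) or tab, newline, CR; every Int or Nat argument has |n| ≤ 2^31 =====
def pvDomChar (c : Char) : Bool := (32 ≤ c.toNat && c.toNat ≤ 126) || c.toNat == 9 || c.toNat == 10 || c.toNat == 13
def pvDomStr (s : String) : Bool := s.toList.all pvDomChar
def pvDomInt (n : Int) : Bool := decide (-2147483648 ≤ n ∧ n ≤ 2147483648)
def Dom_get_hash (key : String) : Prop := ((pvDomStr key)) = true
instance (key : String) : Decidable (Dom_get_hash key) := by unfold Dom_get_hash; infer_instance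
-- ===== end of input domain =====

-- B computes the same djb-style hash as an explicit weighted sum of ord(c)*31^position
-- (reverse traversal threading a running power of 31) instead of A's Horner accumulation;
-- alternative decomposition, same cost.


-- ===== PORT A =====
-- key : String, so the isinstance(key, (list, str)) guard is always true; the else branch is unreachable.
-- '<< 5' on Python ints is multiplication by 2^5 (exact for every Int).
def get_hash (key : String) : Int :=
  key.toList.foldl (fun hashsum character => (character.toNat : Int) + hashsum * 2 ^ 5 - hashsum) 0

-- ===== PORT B =====
-- reversed(key) loop threading (total, power); returns total.
def get_hash_alt (key : String) : Int :=
  (key.toList.reverse.foldl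
    (fun (st : Int × Int) character => (st.1 + (character.toNat : Int) * st.2, st.2 * 31))
    (0, 1)).1

-- ===== PRECONDITION & SPEC =====
def Spec_get_hash (key : String) (out : Int) : Prop := out = get_hash_alt key
instance (key : String) (out : Int) : Decidable (Spec_get_hash key out) := by unfold Spec_get_hash; infer_instance

-- ===== CLAIM (what is proved, stated in full; the proofs are below) =====
def Claim_equal_get_hash : Prop := ∀ (key : String), Dom_get_hash key → Spec_get_hash key (get_hash key)

-- ===== LEMMAS AND PROOFS =====
theorem pvA_append (l : List Char) (c : Char) (h : Int) :
    (l ++ [c]).foldl (fun hashsum character => (character.toNat : Int) + hashsum * 2 ^ 5 - hashsum) h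
      = (c.toNat : Int) + 31 * l.foldl (fun hashsum character => (character.toNat : Int) + hashsum * 2 ^ 5 - hashsum) h := by
  simp [List.foldl_append]
  ring

theorem pvB_fold (l : List Char) (t p : Int) :
    (l.foldl (fun (st : Int × Int) character => (st.1 + (character.toNat : Int) * st.2, st.2 * 31)) (t, p)).1
      = t + p * l.reverse.foldl (fun hashsum character => (character.toNat : Int) + hashsum * 2 ^ 5 - hashsum) 0 := by
  induction l generalizing t p with
  | nil => simp
  | cons c l ih =>
      simp only [List.foldl_cons, List.reverse_cons, pvA_append, ih]
      ring

-- ===== VERDICT (by name: the statement is the Claim_ definition above) =====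
theorem get_hash_spec : Claim_equal_get_hash := by
  intro key _
  unfold Spec_get_hash get_hash get_hash_alt
  rw [pvB_fold]
  simp
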